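-- pv_equiv track=rewrite | github.com/elarchi2005/MC | Taller 24.py | sum_polynomials
-- ===== SOURCE A (Python) =====
-- def sum_polynomials(polys):
--
--     max_len = max(len(p) for p in polys)
--     result = [0] * max_len
--     for p in polys:
--         offset = max_len - len(p)
--         for i in range(len(p)):
--             result[offset + i] += p[i]
--     return result
-- ===== SOURCE B (Python) =====
-- def sum_polynomials(polys):
--     max_len = max(len(p) for p in polys)
--     # column k counts from the rightmost (constant) coefficient outward
--     cols = [sum(p[~k] for p in polys if k < len(p)) for k in range(max_len)]
--     return cols[::-1]
-- ===== Notes on version B (the rewrite author's own statement) =====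
-- stated objective: alternative
-- what changed: B gathers each aligned column (from the rightmost coefficient outward, via negative indexing) and sums it in one comprehension, instead of A's scatter-accumulate into a preallocated result via offset indices.
-- outside the precondition, e.g. on sum_polynomials([]): A raises ValueError, B raises ValueError
import Mathlib
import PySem

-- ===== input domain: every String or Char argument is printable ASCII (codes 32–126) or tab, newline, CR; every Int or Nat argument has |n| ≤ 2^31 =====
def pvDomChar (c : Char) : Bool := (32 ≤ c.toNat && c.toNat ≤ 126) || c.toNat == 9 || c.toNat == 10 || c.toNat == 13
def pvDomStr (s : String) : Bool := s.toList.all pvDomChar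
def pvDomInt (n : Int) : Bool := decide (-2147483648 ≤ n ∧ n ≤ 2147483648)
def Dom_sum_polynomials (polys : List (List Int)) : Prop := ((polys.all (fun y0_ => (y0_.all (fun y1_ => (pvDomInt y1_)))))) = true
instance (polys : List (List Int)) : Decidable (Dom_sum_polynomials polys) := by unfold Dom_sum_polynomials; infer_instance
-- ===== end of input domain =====

-- B sums each right-aligned column directly instead of scatter-accumulating into a
-- preallocated result; same asymptotic cost ("alternative"), equivalence proved below.

-- ===== PORT A =====
-- max(len(p) for p in polys): fold of max over the lengths (Python raises on [], excluded by Pre_)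
def sum_polynomials (polys : List (List Int)) : List Int :=
  let maxLen := polys.foldl (fun m p => max m p.length) 0
  polys.foldl (fun result p =>
    let offset := maxLen - p.length
    (List.range p.length).foldl (fun r i =>
      r.set (offset + i) (r.getD (offset + i) 0 + p.getD i 0)) result)
    (List.replicate maxLen 0)

-- ===== PORT B =====
-- p[~k] = p[len(p)-1-k], always in range under the guard k < len(p); getD is exact there
def sum_polynomials_alt (polys : List (List Int)) : List Int :=
  let maxLen := polys.foldl (fun m p => max m p.length) 0
  ((List.range maxLen).map (fun k =>
    ((polys.filter (fun p => decide (k < p.length))).map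
      (fun p => p.getD (p.length - 1 - k) 0)).sum)).reverse

-- ===== PRECONDITION & SPEC =====
-- Pre_ excludes only polys = [], where Python's max() raises ValueError in both A and B.
def Pre_sum_polynomials (polys : List (List Int)) : Prop := polys ≠ []
instance (polys : List (List Int)) : Decidable (Pre_sum_polynomials polys) := by
  unfold Pre_sum_polynomials; infer_instance
def pvWitness_sum_polynomials : List (List Int) := [[1, 2], [3]]
def Spec_sum_polynomials (polys : List (List Int)) (out : List Int) : Prop := out = sum_polynomials_alt polys
instance (polys : List (List Int)) (out : List Int) : Decidable (Spec_sum_polynomials polys out) := by unfold Spec_sum_polynomials; infer_instance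

-- ===== CLAIM (what is proved, stated in full; the proofs are below) =====
def Claim_equal_sum_polynomials : Prop := ∀ (polys : List (List Int)), Dom_sum_polynomials polys → Pre_sum_polynomials polys → Spec_sum_polynomials polys (sum_polynomials polys)

-- ===== LEMMAS AND PROOFS =====

-- contribution of polynomial p to index j of the result (ml = the common length)
def pvContrib (ml j : Nat) (p : List Int) : Int :=
  if ml - p.length ≤ j ∧ j < ml then p.getD (j - (ml - p.length)) 0 else 0

lemma pv_foldl_max_le (t : List (List Int)) :
    ∀ (a b : Nat), a ≤ b → a ≤ t.foldl (fun m p => max m p.length) b := by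
  induction t with
  | nil => intro a b hab; exact hab
  | cons r s ihs => intro a b hab; exact ihs _ _ (le_trans hab (le_max_left _ _))

lemma pv_len_le_max_from (polys : List (List Int)) :
    ∀ (b : Nat) (p : List Int), p ∈ polys → p.length ≤ polys.foldl (fun m p => max m p.length) b := by
  induction polys with
  | nil => intro b p hp; cases hp
  | cons q t ih =>
    intro b p hp
    rcases List.mem_cons.mp hp with rfl | hp
    · exact pv_foldl_max_le t _ _ (le_max_right _ _)
    · exact ih _ p hp

lemma pv_len_le_max (polys : List (List Int)) (p : List Int) (hp : p ∈ polys) :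
    p.length ≤ polys.foldl (fun m p => max m p.length) 0 :=
  pv_len_le_max_from polys 0 p hp

-- inner loop of A: after scattering p at offset, index j gains p.getD (j-offset) on [offset, offset+n)
lemma pv_inner (p : List Int) (offset : Nat) :
    ∀ (n : Nat) (res : List Int), offset + n ≤ res.length → n ≤ p.length →
      ((List.range n).foldl (fun r i =>
          r.set (offset + i) (r.getD (offset + i) 0 + p.getD i 0)) res).length = res.length ∧
      ∀ j, ((List.range n).foldl (fun r i =>
          r.set (offset + i) (r.getD (offset + i) 0 + p.getD i 0)) res).getD j 0 =
        res.getD j 0 + (if offset ≤ j ∧ j < offset + n then p.getD (j - offset) 0 else 0) := by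
  intro n
  induction n with
  | zero =>
    intro res _ _
    refine ⟨rfl, fun j => ?_⟩
    simp
  | succ n ih =>
    intro res hlen hn
    obtain ⟨ihlen, ihget⟩ := ih res (by omega) (by omega)
    rw [List.range_succ, List.foldl_append]
    set r := (List.range n).foldl (fun r i =>
      r.set (offset + i) (r.getD (offset + i) 0 + p.getD i 0)) res with hr
    simp only [List.foldl_cons, List.foldl_nil]
    constructor
    · simp [ihlen]
    · intro j
      have hjr : offset + n < r.length := by omega
      by_cases hj : j = offset + n
      · subst hj
        rw [List.getD_eq_getElem?_getD, List.getElem?_set_self (by omega)]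
        simp only [Option.getD_some]
        rw [ihget]
        have h1 : ¬ (offset ≤ offset + n ∧ offset + n < offset + n) := by omega
        have h2 : (offset ≤ offset + n ∧ offset + n < offset + (n+1)) := by omega
        simp [h2]
      · rw [List.getD_eq_getElem?_getD, List.getElem?_set_ne (by omega),
            ← List.getD_eq_getElem?_getD, ihget]
        have : (offset ≤ j ∧ j < offset + n) ↔ (offset ≤ j ∧ j < offset + (n+1)) := by omega
        rw [if_congr this rfl rfl]

-- outer loop of A: the result has length ml and index j holds the sum of contributions
lemma pv_outer (ml : Nat) :
    ∀ (polys : List (List Int)) (res : List Int), res.length = ml →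
      (∀ p ∈ polys, p.length ≤ ml) →
      (polys.foldl (fun result p =>
          (List.range p.length).foldl (fun r i =>
            r.set (ml - p.length + i) (r.getD (ml - p.length + i) 0 + p.getD i 0)) result) res).length = ml ∧
      ∀ j, (polys.foldl (fun result p =>
          (List.range p.length).foldl (fun r i =>
            r.set (ml - p.length + i) (r.getD (ml - p.length + i) 0 + p.getD i 0)) result) res).getD j 0 =
        res.getD j 0 + (polys.map (pvContrib ml j)).sum := by
  intro polys
  induction polys with
  | nil => intro res hres _; exact ⟨hres, by simp⟩
  | cons p t ih =>
    intro res hres hall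
    have hple : p.length ≤ ml := hall p (List.mem_cons_self ..)
    obtain ⟨ilen, iget⟩ := pv_inner p (ml - p.length) p.length res (by omega) le_rfl
    simp only [List.foldl_cons]
    obtain ⟨olen, oget⟩ := ih _ (by rw [ilen, hres]) (fun q hq => hall q (List.mem_cons_of_mem _ hq))
    refine ⟨olen, fun j => ?_⟩
    rw [oget, iget]
    have hcond : (ml - p.length ≤ j ∧ j < ml - p.length + p.length) ↔ (ml - p.length ≤ j ∧ j < ml) := by omega
    simp only [List.map_cons, List.sum_cons, pvContrib, hcond]
    ring

-- filtered-map sum = sum over all with a guard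
lemma pv_sum_filter (l : List (List Int)) (q : List Int → Bool) (f : List Int → Int) :
    ((l.filter q).map f).sum = (l.map (fun p => if q p then f p else 0)).sum := by
  induction l with
  | nil => rfl
  | cons p t ih =>
    by_cases h : q p <;> simp [h, ih]

-- per-polynomial: B's column entry at column ml-1-j equals pvContrib ml j p
lemma pv_col_entry (ml j : Nat) (p : List Int) (hj : j < ml) (hp : p.length ≤ ml) :
    (if decide (ml - 1 - j < p.length) = true then p.getD (p.length - 1 - (ml - 1 - j)) 0 else 0) =
    pvContrib ml j p := by
  unfold pvContrib
  by_cases h : ml - 1 - j < p.length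
  · have h2 : ml - p.length ≤ j ∧ j < ml := by omega
    have harg : p.length - 1 - (ml - 1 - j) = j - (ml - p.length) := by omega
    simp [h, h2, harg]
  · have h2 : ¬ (ml - p.length ≤ j ∧ j < ml) := by omega
    rw [if_neg (by simp [h]), if_neg h2]

-- ===== VERDICT (by name: the statement is the Claim_ definition above) =====
theorem sum_polynomials_spec : Claim_equal_sum_polynomials := by
  intro polys _ _
  unfold Spec_sum_polynomials sum_polynomials sum_polynomials_alt
  set ml := polys.foldl (fun m p => max m p.length) 0 with hml
  obtain ⟨hlen, hget⟩ := pv_outer ml polys (List.replicate ml 0) (by simp)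
    (fun p hp => pv_len_le_max polys p hp)
  have hBlen : (((List.range ml).map (fun k =>
      ((polys.filter (fun p => decide (k < p.length))).map
        (fun p => p.getD (p.length - 1 - k) 0)).sum)).reverse).length = ml := by simp
  apply List.ext_getElem (by rw [hlen, hBlen])
  intro j h1 h2
  have hjml : j < ml := by rwa [hlen] at h1
  have hA : (polys.foldl (fun result p =>
      (List.range p.length).foldl (fun r i =>
        r.set (ml - p.length + i) (r.getD (ml - p.length + i) 0 + p.getD i 0)) result)
      (List.replicate ml 0))[j] = (polys.map (pvContrib ml j)).sum := by
    have := hget j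
    rw [List.getD_eq_getElem?_getD, List.getElem?_eq_getElem h1] at this
    simpa using this
  rw [hA, List.getElem_reverse, List.getElem_map, List.getElem_range]
  have hidx : ((List.range ml).map (fun k =>
      ((polys.filter (fun p => decide (k < p.length))).map
        (fun p => p.getD (p.length - 1 - k) 0)).sum)).length - 1 - j = ml - 1 - j := by simp
  rw [hidx, pv_sum_filter]
  congr 1
  apply List.map_congr_left
  intro p hp
  exact (pv_col_entry ml j p hjml (pv_len_le_max polys p hp)).symm
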